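-- pv_equiv track=rewrite | github.com/Eldossss/pp2 | 9thlab/all_needs_photos_and_data/helloworld.py | handle_color_buttons_click
-- ===== SOURCE A (Python) =====
-- BLACK = (0, 0, 0)
--
-- BLUE = (0, 0, 255) # опции цветов какие цветы существуют для рисования
--
-- GREEN = (0, 255, 0)
--
-- RED = (255, 0, 0)
--
-- YELLOW = (255, 255, 0)
--
-- PURPLE = (255, 0, 255)
--
-- DARKBLUE = (0, 0, 128)
--
-- def handle_color_buttons_click(pos):
--      button_width = 50  # устнаваливаем нажимаем ли мы на границе блоков для цветов  (проверяем мышка расположена ли в блоках)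
--      button_height = 50
--      button_margin = 10
--      colors = [BLACK, RED, GREEN, BLUE, YELLOW, PURPLE, DARKBLUE]
--      x = 10
--      y = 10
--      for color in colors:
--          if x <= pos[0] <= x + button_width and y <= pos[1] <= y + button_height: # если позиция кнопка мыши по оси х между (x -> x это 10 ) и между границей правого блока
--              return color # вернем цвет
--          y += button_height + button_margin
--      return None # если кнопка не входит за гарницы точек тот ничего не рисуем
-- ===== SOURCE B (Python) =====
-- BLACK = (0, 0, 0)
-- BLUE = (0, 0, 255)
-- GREEN = (0, 255, 0)
-- RED = (255, 0, 0)
-- YELLOW = (255, 255, 0)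
-- PURPLE = (255, 0, 255)
-- DARKBLUE = (0, 0, 128)
--
-- def handle_color_buttons_click(pos):
--     # closed form: no loop; row index computed by floor division
--     if not (10 <= pos[0] <= 60):
--         return None
--     d = pos[1] - 10
--     idx = d // 60
--     off = d % 60
--     if 0 <= idx <= 6 and off <= 50:
--         return [BLACK, RED, GREEN, BLUE, YELLOW, PURPLE, DARKBLUE][idx]
--     return None
-- ===== Notes on version B (the rewrite author's own statement) =====
-- stated objective: alternative
-- what changed: Replaces the 7-iteration scan over color rows with a closed-form computation: the row index is obtained by floor division of the y offset and used to index the color list directly.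
import Mathlib
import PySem

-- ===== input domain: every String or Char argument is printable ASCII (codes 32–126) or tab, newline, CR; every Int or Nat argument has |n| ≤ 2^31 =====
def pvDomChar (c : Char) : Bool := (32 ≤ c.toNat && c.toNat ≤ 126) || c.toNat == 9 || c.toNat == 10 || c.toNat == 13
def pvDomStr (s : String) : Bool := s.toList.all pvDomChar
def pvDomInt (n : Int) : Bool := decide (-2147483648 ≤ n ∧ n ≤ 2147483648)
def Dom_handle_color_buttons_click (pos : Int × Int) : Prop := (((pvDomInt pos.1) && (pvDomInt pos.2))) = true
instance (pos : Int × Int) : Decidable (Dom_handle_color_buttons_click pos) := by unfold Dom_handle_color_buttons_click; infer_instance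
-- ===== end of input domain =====

-- B replaces A's scan over the seven button rows by a closed-form floor-division index (different decomposition, same behaviour).

-- ===== PORT A =====
-- the colors list of A (and B): [BLACK, RED, GREEN, BLUE, YELLOW, PURPLE, DARKBLUE]
def pvColors : List (Int × Int × Int) :=
  [(0,0,0), (255,0,0), (0,255,0), (0,0,255), (255,255,0), (255,0,255), (0,0,128)]

-- the 'for color in colors' loop with accumulator y
def pvA_loop (pos : Int × Int) : List (Int × Int × Int) → Int → Option (Int × Int × Int)
  | [], _ => none
  | c :: rest, y =>
    if (10 ≤ pos.1 ∧ pos.1 ≤ 10 + 50) ∧ (y ≤ pos.2 ∧ pos.2 ≤ y + 50) then some c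
    else pvA_loop pos rest (y + (50 + 10))

def handle_color_buttons_click (pos : Int × Int) : Option (Int × Int × Int) :=
  pvA_loop pos pvColors 10

-- ===== PORT B =====
def pvColorsB : List (Int × Int × Int) :=
  [(0,0,0), (255,0,0), (0,255,0), (0,0,255), (255,255,0), (255,0,255), (0,0,128)]

def handle_color_buttons_click_alt (pos : Int × Int) : Option (Int × Int × Int) :=
  if ¬ (10 ≤ pos.1 ∧ pos.1 ≤ 60) then none
  else
    let d := pos.2 - 10
    let idx := PySem.Int.floordiv d 60
    let off := PySem.Int.mod d 60
    if 0 ≤ idx ∧ idx ≤ 6 ∧ off ≤ 50 then PySem.List.pyGet? pvColorsB idx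
    else none

-- ===== PRECONDITION & SPEC =====
def Spec_handle_color_buttons_click (pos : Int × Int) (out : Option (Int × Int × Int)) : Prop := out = handle_color_buttons_click_alt pos
instance (pos : Int × Int) (out : Option (Int × Int × Int)) : Decidable (Spec_handle_color_buttons_click pos out) := by unfold Spec_handle_color_buttons_click; infer_instance

-- ===== CLAIM (what is proved, stated in full; the proofs are below) =====
def Claim_equal_handle_color_buttons_click : Prop := ∀ (pos : Int × Int), Dom_handle_color_buttons_click pos → Spec_handle_color_buttons_click pos (handle_color_buttons_click pos)

-- ===== LEMMAS AND PROOFS =====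

-- ===== VERDICT (by name: the statement is the Claim_ definition above) =====
theorem handle_color_buttons_click_spec : Claim_equal_handle_color_buttons_click := by
  intro ⟨px, py⟩ _
  unfold Spec_handle_color_buttons_click handle_color_buttons_click handle_color_buttons_click_alt
  simp only [PySem.Int.floordiv_eq_ediv_of_pos (show (0:Int) < 60 by norm_num),
             PySem.Int.mod_eq_emod_of_pos (show (0:Int) < 60 by norm_num)]
  by_cases hx : 10 ≤ px ∧ px ≤ 60
  case neg =>
    simp [pvA_loop, pvColors, hx]
  case pos =>
    by_cases h0 : 10 ≤ py ∧ py ≤ 60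
    · have e : (py - 10) / 60 = 0 := by omega
      have eo : (py - 10) % 60 ≤ 50 := by omega
      simp [pvA_loop, pvColors, pvColorsB, PySem.List.pyGet?, hx, h0, e, eo]
      decide
    by_cases h1 : 70 ≤ py ∧ py ≤ 120
    · have e : (py - 10) / 60 = 1 := by omega
      have eo : (py - 10) % 60 ≤ 50 := by omega
      simp [pvA_loop, pvColors, pvColorsB, PySem.List.pyGet?, hx, h1, e, eo, h0]
      decide
    by_cases h2 : 130 ≤ py ∧ py ≤ 180
    · have e : (py - 10) / 60 = 2 := by omega
      have eo : (py - 10) % 60 ≤ 50 := by omega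
      simp [pvA_loop, pvColors, pvColorsB, PySem.List.pyGet?, hx, h2, e, eo, h0, h1]
      decide
    by_cases h3 : 190 ≤ py ∧ py ≤ 240
    · have e : (py - 10) / 60 = 3 := by omega
      have eo : (py - 10) % 60 ≤ 50 := by omega
      simp [pvA_loop, pvColors, pvColorsB, PySem.List.pyGet?, hx, h3, e, eo, h0, h1, h2]
      decide
    by_cases h4 : 250 ≤ py ∧ py ≤ 300
    · have e : (py - 10) / 60 = 4 := by omega
      have eo : (py - 10) % 60 ≤ 50 := by omega
      simp [pvA_loop, pvColors, pvColorsB, PySem.List.pyGet?, hx, h4, e, eo, h0, h1, h2, h3]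
      decide
    by_cases h5 : 310 ≤ py ∧ py ≤ 360
    · have e : (py - 10) / 60 = 5 := by omega
      have eo : (py - 10) % 60 ≤ 50 := by omega
      simp [pvA_loop, pvColors, pvColorsB, PySem.List.pyGet?, hx, h5, e, eo, h0, h1, h2, h3, h4]
      decide
    by_cases h6 : 370 ≤ py ∧ py ≤ 420
    · have e : (py - 10) / 60 = 6 := by omega
      have eo : (py - 10) % 60 ≤ 50 := by omega
      simp [pvA_loop, pvColors, pvColorsB, PySem.List.pyGet?, hx, h6, e, eo, h0, h1, h2, h3, h4, h5]
      decide
    have g : ¬(0 ≤ (py - 10) / 60 ∧ (py - 10) / 60 ≤ 6 ∧ (py - 10) % 60 ≤ 50) := by omega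
    simp [pvA_loop, pvColors, hx, g, h0, h1, h2, h3, h4, h5, h6]
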